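-- pv_equiv track=rewrite | github.com/greyreality/python_tasks | codility_practice/sample_test1.py | solution
-- ===== SOURCE A (Python) =====
-- def solution(A):
--     unique_values = []
--     ind = []
--     for i in A:
--         if i not in unique_values:
--             unique_values.append(i)
--
--     for i in unique_values:
--         for j in A:
--             if i == j:
--                 ind.append(A.index(j))
--                 break
--     return  (int(max(ind)))
-- ===== SOURCE B (Python) =====
-- def solution(A):
--     # largest index that is the first occurrence of its value, found from the end
--     for i in range(len(A) - 1, -1, -1):
--         if A[i] not in A[:i]:
--             return i
--     raise ValueError("solution() arg is an empty list")
-- ===== Notes on version B (the rewrite author's own statement) =====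
-- stated objective: faster
-- what changed: Instead of collecting all distinct values and then, per value, rescanning A with an inner loop plus list.index to gather every first-occurrence index and taking their max, B scans once from the right and returns the first index whose value does not occur earlier, short-circuiting.
import Mathlib
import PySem

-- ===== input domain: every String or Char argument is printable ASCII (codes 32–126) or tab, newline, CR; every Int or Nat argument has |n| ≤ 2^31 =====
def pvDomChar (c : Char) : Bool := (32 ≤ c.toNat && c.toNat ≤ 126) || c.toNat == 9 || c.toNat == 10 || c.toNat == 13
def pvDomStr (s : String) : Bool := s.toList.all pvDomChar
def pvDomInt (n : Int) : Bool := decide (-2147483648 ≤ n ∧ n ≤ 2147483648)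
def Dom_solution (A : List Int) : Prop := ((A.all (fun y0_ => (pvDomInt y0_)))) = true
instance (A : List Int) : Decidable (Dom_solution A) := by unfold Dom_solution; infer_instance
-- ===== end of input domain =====

-- B replaces A's collect-all-first-occurrence-indices-then-max with a single short-circuiting
-- scan from the right for the largest index whose value does not occur earlier (objective: faster).


-- ===== PORT A =====
-- inner loop 'for j in A: if i == j: ind.append(A.index(j)); break' (scanned list is the 3rd arg;
-- A.index(j) = index? A j, defined at the call since j ∈ A there — getD 0 is unreachable)
def solAInner (A : List Int) (i : Int) (ind : List Int) : List Int → List Int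
  | [] => ind
  | j :: rest => if i = j then ind ++ [(((PySem.List.index? A j).getD 0 : Nat) : Int)]
                 else solAInner A i ind rest

def solution (A : List Int) : Int :=
  -- 'if i not in unique_values: unique_values.append(i)' is exactly PySem.Set.add
  let unique_values := A.foldl PySem.Set.add PySem.Set.empty
  let ind := unique_values.foldl (fun ind i => solAInner A i ind A) []
  -- int(max(ind)); Python raises ValueError when ind = [] (i.e. A = []), excluded by Pre_
  (PySem.List.max? ind (fun x => x)).getD 0

-- ===== PORT B =====
-- 'for i in range(len(A)-1, -1, -1): if A[i] not in A[:i]: return i'; n counts the remaining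
-- iterations, the current index is i = n-1.  At n = 0 the Python raises ValueError (only A = [],
-- excluded by Pre_); the 0 there is unreachable.
def solBGo (A : List Int) : Nat → Int
  | 0 => 0
  | n + 1 =>
      if PySem.List.pyGetD A (n : Int) 0 ∈ PySem.List.slice A none (some (n : Int))
      then solBGo A n
      else (n : Int)

def solution_alt (A : List Int) : Int := solBGo A A.length

-- ===== PRECONDITION & SPEC =====
-- Pre_ excludes only the empty list, on which A raises ValueError (max of an empty sequence).
def Pre_solution (A : List Int) : Prop := A ≠ []
instance (A : List Int) : Decidable (Pre_solution A) := by unfold Pre_solution; infer_instance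
def pvWitness_solution : List Int := [3, 1, 3, 2]
def Spec_solution (A : List Int) (out : Int) : Prop := out = solution_alt A
instance (A : List Int) (out : Int) : Decidable (Spec_solution A out) := by unfold Spec_solution; infer_instance

-- ===== CLAIM (what is proved, stated in full; the proofs are below) =====
def Claim_equal_solution : Prop := ∀ (A : List Int), Dom_solution A → Pre_solution A → Spec_solution A (solution A)

-- ===== LEMMAS AND PROOFS =====

-- the inner scan finds the first j = i, so it appends index? A i exactly when i occurs in the scanned list
theorem solAInner_eq (A : List Int) (i : Int) (ind : List Int) (l : List Int) :
    solAInner A i ind l =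
      if i ∈ l then ind ++ [(((PySem.List.index? A i).getD 0 : Nat) : Int)] else ind := by
  induction l with
  | nil => simp [solAInner]
  | cons j rest ih =>
      by_cases h : i = j
      · subst h; simp [solAInner]
      · simp [solAInner, h, ih]

-- B's loop returns the greatest first-occurrence index below n
theorem solBGo_spec (A : List Int) (n : Nat) (hn : 0 < n) (hle : n ≤ A.length) :
    ∃ k : Nat, solBGo A n = (k : Int) ∧ k < n ∧ A[k]?.getD 0 ∉ A.take k ∧
      ∀ j : Nat, k < j → j < n → A[j]?.getD 0 ∈ A.take j := by
  induction n with
  | zero => omega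
  | succ m ih =>
      by_cases hmem : PySem.List.pyGetD A (m : Int) 0 ∈ PySem.List.slice A none (some (m : Int))
      · simp at hmem
        have hm : 0 < m := by
          rcases Nat.eq_zero_or_pos m with h0 | h0
          · exfalso; subst h0; simp at hmem
          · exact h0
        obtain ⟨k, hk, hklt, hkfo, hkmax⟩ := ih hm (by omega)
        refine ⟨k, ?_, by omega, hkfo, ?_⟩
        · simp only [solBGo]
          rw [if_pos (by simpa using hmem), hk]
        · intro j hkj hjm
          rcases Nat.lt_succ_iff_lt_or_eq.mp hjm with h | h
          · exact hkmax j hkj h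
          · subst h; exact hmem
      · refine ⟨m, ?_, by omega, by simpa using hmem, by omega⟩
        simp only [solBGo]
        rw [if_neg hmem]

-- a first-occurrence index is the value's index?
theorem index?_of_firstOcc (A : List Int) (k : Nat) (hk : k < A.length)
    (hfo : A[k] ∉ A.take k) : PySem.List.index? A A[k] = some k := by
  rw [PySem.List.index?_eq_some_iff]
  refine ⟨A.take k, A.drop (k + 1), ?_, by simp [Nat.min_eq_left (Nat.le_of_lt hk)], hfo⟩
  conv_lhs => rw [← List.take_append_drop k A]
  congr 1
  rw [List.drop_eq_getElem_cons hk]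

-- conversely, index? gives a first-occurrence index
theorem firstOcc_of_index? (A : List Int) (v : Int) (k : Nat)
    (h : PySem.List.index? A v = some k) :
    ∃ hk : k < A.length, A[k] = v ∧ v ∉ A.take k := by
  obtain ⟨hk, hv, hbefore⟩ := PySem.List.getElem_of_index?_eq_some h
  refine ⟨hk, hv, fun hmem => ?_⟩
  obtain ⟨j, hj, hje⟩ := List.getElem_of_mem hmem
  have hjk : j < k := by simp [List.length_take] at hj; omega
  exact hbefore j hjk (by simpa [List.getElem_take] using hje)

theorem solution_eq_solBGo (A : List Int) (hA : A ≠ []) : solution A = solBGo A A.length := by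
  obtain ⟨k, hk, hklt, hkfo, hkmax⟩ :=
    solBGo_spec A A.length (by cases A <;> simp_all) le_rfl
  rw [hk]
  show (PySem.List.max? ((A.foldl PySem.Set.add PySem.Set.empty).foldl
        (fun ind i => solAInner A i ind A) []) (fun x => x)).getD 0 = (k : Int)
  have huniq : A.foldl PySem.Set.add PySem.Set.empty = PySem.Set.ofList A :=
    (PySem.Set.ofList_eq_foldl A).symm
  rw [huniq]
  -- turn the outer loop into a map over the distinct values
  have hind : (PySem.Set.ofList A).foldl (fun ind i => solAInner A i ind A) [] =
      (PySem.Set.ofList A).map (fun i => (((PySem.List.index? A i).getD 0 : Nat) : Int)) := by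
    have hcong := PySem.List.foldl_congr_mem (l := PySem.Set.ofList A) (init := ([] : List Int))
      (f := fun ind i => solAInner A i ind A)
      (g := fun ind i => ind ++ [(((PySem.List.index? A i).getD 0 : Nat) : Int)])
      (fun ind i hi => by
        show solAInner A i ind A = ind ++ [(((PySem.List.index? A i).getD 0 : Nat) : Int)]
        rw [solAInner_eq, if_pos ((PySem.Set.mem_ofList _ _).mp hi)])
    rw [hcong]
    simpa using PySem.List.foldl_append_singleton_eq_map
      (l := PySem.Set.ofList A) (f := fun i => (((PySem.List.index? A i).getD 0 : Nat) : Int)) (acc := [])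
  rw [hind]
  set ind := (PySem.Set.ofList A).map (fun i => (((PySem.List.index? A i).getD 0 : Nat) : Int)) with hinddef
  -- k is in ind
  have hkA : k < A.length := hklt
  have hkval : PySem.List.index? A A[k] = some k :=
    index?_of_firstOcc A k hkA (by simpa [hkA] using hkfo)
  have hkmem : (k : Int) ∈ ind := by
    rw [hinddef]
    exact List.mem_map.mpr ⟨A[k], (PySem.Set.mem_ofList _ _).mpr (List.getElem_mem hkA), by
      rw [hkval]; rfl⟩
  -- every element of ind is ≤ k
  have hbound : ∀ x ∈ ind, x ≤ (k : Int) := by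
    intro x hx
    rw [hinddef] at hx
    obtain ⟨v, hv, hvx⟩ := List.mem_map.mp hx
    have hvA : v ∈ A := (PySem.Set.mem_ofList _ _).mp hv
    obtain ⟨j, hj⟩ := Option.isSome_iff_exists.mp ((PySem.List.index?_isSome_iff _ _).mpr hvA)
    obtain ⟨hjA, hjv, hjfo⟩ := firstOcc_of_index? A v j hj
    have hjk : j ≤ k := by
      by_contra hgt
      exact (hjv ▸ hjfo) (by
        simpa [hjA] using hkmax j (by omega) hjA)
    subst hvx
    rw [hj]
    exact_mod_cast hjk
  -- max? of ind is k
  obtain ⟨m, hm⟩ := Option.isSome_iff_exists.mp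
    (by rw [Option.isSome_iff_ne_none]
        intro hnone
        rw [PySem.List.max?_eq_none_iff] at hnone
        simp [hnone] at hkmem :
      (PySem.List.max? ind (fun x => x)).isSome)
  have hmmem : m ∈ ind := PySem.List.max?_mem hm
  have hmk : m = (k : Int) :=
    le_antisymm (hbound m hmmem) (PySem.List.max?_isMax hm (k : Int) hkmem)
  simp [hm, hmk]

-- ===== VERDICT (by name: the statement is the Claim_ definition above) =====
theorem solution_spec : Claim_equal_solution := by
  intro A _ hpre
  unfold Spec_solution solution_alt
  exact solution_eq_solBGo A hpre
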